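-- pv_equiv track=rewrite | github.com/DeebTibi/AVL | tester.py | create_arr3
-- ===== SOURCE A (Python) =====
-- def create_arr3(n):
--     start, end = 0, 300
--     res = []
--     while end <= n:
--         tmp = [i for i in range(end - 1, start - 1, -1)]
--         res = res + tmp
--         start = end
--         end = end + 300
--     return res
-- ===== SOURCE B (Python) =====
-- def create_arr3(n):
--     m = n // 300
--     return [300 * (i // 300) + 299 - i % 300 for i in range(300 * m)]
-- ===== Notes on version B (the rewrite author's own statement) =====
-- stated objective: faster
-- what changed: Replaces the while loop with repeated list concatenation (res = res + tmp) by a single flat comprehension computing each element from its global index in closed form.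
import Mathlib
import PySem

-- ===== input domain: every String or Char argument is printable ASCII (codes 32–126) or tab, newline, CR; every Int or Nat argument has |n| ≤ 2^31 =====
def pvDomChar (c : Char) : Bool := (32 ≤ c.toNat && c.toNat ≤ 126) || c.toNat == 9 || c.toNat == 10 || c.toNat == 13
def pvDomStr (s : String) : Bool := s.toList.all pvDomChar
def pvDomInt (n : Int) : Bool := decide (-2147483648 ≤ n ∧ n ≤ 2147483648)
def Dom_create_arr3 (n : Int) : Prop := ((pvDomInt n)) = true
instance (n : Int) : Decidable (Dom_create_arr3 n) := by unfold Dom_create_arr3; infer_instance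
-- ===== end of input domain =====

-- B replaces A's while loop with quadratic repeated concatenation by one flat
-- closed-form comprehension over the global index (measured faster, asymptotic).

-- ===== PORT A =====
-- the while loop of A: state (start, end, res); tmp = range(end-1, start-1, -1)
def create_arr3Loop (n start e : Int) (res : List Int) : List Int :=
  if e ≤ n then
    create_arr3Loop n e (e + 300) (res ++ PySem.List.pyRange (e - 1) (start - 1) (-1))
  else res
termination_by (n - e + 300).toNat
decreasing_by omega

def create_arr3 (n : Int) : List Int := create_arr3Loop n 0 300 []

-- ===== PORT B =====
-- the comprehension's element expression
def create_arr3Elem (i : Int) : Int :=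
  300 * PySem.Int.floordiv i 300 + 299 - PySem.Int.mod i 300

def create_arr3_alt (n : Int) : List Int :=
  (PySem.List.pyRange 0 (300 * PySem.Int.floordiv n 300) 1).map create_arr3Elem

-- ===== PRECONDITION & SPEC =====
def Spec_create_arr3 (n : Int) (out : List Int) : Prop := out = create_arr3_alt n
instance (n : Int) (out : List Int) : Decidable (Spec_create_arr3 n out) := by unfold Spec_create_arr3; infer_instance

-- ===== CLAIM (what is proved, stated in full; the proofs are below) =====
def Claim_equal_create_arr3 : Prop := ∀ (n : Int), Dom_create_arr3 n → Spec_create_arr3 n (create_arr3 n)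

-- ===== LEMMAS AND PROOFS =====

-- one 300-block of B's comprehension is exactly A's reversed range block
lemma chunk_eq (k : Int) :
    (PySem.List.pyRange (300 * k) (300 * k + 300) 1).map create_arr3Elem
      = PySem.List.pyRange (300 * k + 300 - 1) (300 * k - 1) (-1) := by
  rw [PySem.List.pyRange_one, PySem.List.pyRange_neg_one]
  have h1 : (300 * k + 300 - 300 * k).toNat = 300 := by omega
  have h2 : (300 * k + 300 - 1 - (300 * k - 1)).toNat = 300 := by omega
  rw [h1, h2, List.map_map]
  refine List.map_congr_left ?_
  intro j hj
  have hj300 : (j : Int) < 300 := by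
    have := List.mem_range.mp hj; exact_mod_cast this
  have hj0 : (0 : Int) ≤ (j : Int) := Int.natCast_nonneg j
  have hdiv : PySem.Int.floordiv (300 * k + (j : Int)) 300 = k := by
    rw [PySem.Int.floordiv_eq_iff_of_pos (by omega)]
    omega
  have hmod : PySem.Int.mod (300 * k + (j : Int)) 300 = (j : Int) := by
    have := PySem.Int.floordiv_mul_add_mod (300 * k + (j : Int)) 300
    rw [hdiv] at this
    omega
  simp only [Function.comp, create_arr3Elem, hdiv, hmod]
  omega

-- loop invariant: from block boundary 300*k the loop appends exactly B's tail
lemma loop_eq : ∀ (t : Nat) (n k : Int), (n - 300 * k).toNat = t → ∀ (res : List Int),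
    create_arr3Loop n (300 * k) (300 * k + 300) res
      = res ++ (PySem.List.pyRange (300 * k) (300 * PySem.Int.floordiv n 300) 1).map
          create_arr3Elem := by
  intro t
  induction t using Nat.strong_induction_on with
  | _ t ih =>
    intro n k ht res
    rw [create_arr3Loop]
    by_cases h : 300 * k + 300 ≤ n
    · simp only [if_pos h]
      have hk1 : k + 1 ≤ PySem.Int.floordiv n 300 := by
        rw [PySem.Int.le_floordiv_iff_mul_le (by omega)]; omega
      have hrec := ih (n - 300 * (k + 1)).toNat (by omega) n (k + 1) rfl
        (res ++ PySem.List.pyRange (300 * k + 300 - 1) (300 * k - 1) (-1))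
      have harg : 300 * (k + 1) = 300 * k + 300 := by ring
      rw [harg] at hrec
      rw [hrec]
      rw [PySem.List.pyRange_one_append (300 * k) (300 * k + 300)
            (300 * PySem.Int.floordiv n 300) (by omega) (by omega)]
      rw [List.map_append, List.append_assoc, chunk_eq]
    · simp only [if_neg h]
      have hm : PySem.Int.floordiv n 300 ≤ k := by
        have := (PySem.Int.floordiv_lt_iff_lt_mul (a := n) (b := 300) (q := k + 1) (by omega)).mpr (by omega)
        omega
      rw [PySem.List.pyRange_one_eq_nil (by omega)]
      simp

-- ===== VERDICT (by name: the statement is the Claim_ definition above) =====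
theorem create_arr3_spec : Claim_equal_create_arr3 := by
  intro n _
  show create_arr3 n = create_arr3_alt n
  have h := loop_eq (n - 300 * 0).toNat n 0 rfl []
  simp only [mul_zero, zero_add] at h
  unfold create_arr3 create_arr3_alt
  rw [h]
  simp
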